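-- pv_equiv track=rewrite | github.com/pc5401/my_BOJ | 백준/Bronze/6810. ISBN/ISBN.py | solve
-- ===== SOURCE A (Python) =====
-- def solve(last_three : list[int]) -> int:
--     fixed_part = [9,7,8,0,9,2,1,4,1,8]
--     isbn = fixed_part + last_three
--
--     one_three_sum = 0
--     for i, digit in enumerate(isbn):
--
--         if i % 2 == 0:
--             one_three_sum += digit * 1
--         else:
--             one_three_sum += digit * 3
--
--     return one_three_sum
-- ===== SOURCE B (Python) =====
-- def solve(last_three: list[int]) -> int:
--     # fixed part's weighted sum is the constant 91; it has even length (10),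
--     # so last_three starts at an even (weight-1) position.
--     total = 91
--     it = iter(last_three)
--     for a in it:
--         total += a + 3 * next(it, 0)
--     return total
-- ===== Notes on version B (the rewrite author's own statement) =====
-- stated objective: faster
-- what changed: Replaces the enumerate loop with an i%2 branch by constant-folding the fixed prefix's weighted sum (91) and one iterative pass consuming last_three two digits at a time, eliminating the index/parity bookkeeping.
import Mathlib
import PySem

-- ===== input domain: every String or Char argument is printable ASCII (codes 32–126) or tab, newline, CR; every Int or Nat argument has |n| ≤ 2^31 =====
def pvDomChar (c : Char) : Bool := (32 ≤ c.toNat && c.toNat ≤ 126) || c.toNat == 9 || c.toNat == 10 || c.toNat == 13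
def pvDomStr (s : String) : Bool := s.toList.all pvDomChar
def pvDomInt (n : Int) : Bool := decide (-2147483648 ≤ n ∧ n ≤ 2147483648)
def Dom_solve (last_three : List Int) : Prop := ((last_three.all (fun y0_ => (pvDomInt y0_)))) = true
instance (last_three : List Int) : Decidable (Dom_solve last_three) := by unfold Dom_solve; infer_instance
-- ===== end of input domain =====

-- ===== PORT A =====
-- literal transliteration of A: build isbn, fold over enumerate with an i%2 branch
def solve (last_three : List Int) : Int :=
  let fixed_part : List Int := [9,7,8,0,9,2,1,4,1,8]
  let isbn := fixed_part ++ last_three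
  (PySem.List.enumerate isbn 0).foldl
    (fun one_three_sum p =>
      if p.1 % 2 = 0 then one_three_sum + p.2 * 1 else one_three_sum + p.2 * 3) 0

-- ===== PORT B =====
-- B's loop: consume the list two digits at a time (next(it, 0) defaults the odd tail to 0)
def solveGoAcc : Int → List Int → Int
  | total, [] => total
  | total, [a] => total + (a + 3 * 0)
  | total, a :: b :: rest => solveGoAcc (total + (a + 3 * b)) rest

-- B: fixed prefix constant-folded to 91, then the pairwise loop
def solve_alt (last_three : List Int) : Int := solveGoAcc 91 last_three

-- ===== PRECONDITION & SPEC =====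
def Spec_solve (last_three : List Int) (out : Int) : Prop := out = solve_alt last_three
instance (last_three : List Int) (out : Int) : Decidable (Spec_solve last_three out) := by unfold Spec_solve; infer_instance

-- ===== CLAIM (what is proved, stated in full; the proofs are below) =====
def Claim_equal_solve : Prop := ∀ (last_three : List Int), Dom_solve last_three → Spec_solve last_three (solve last_three)

-- ===== LEMMAS AND PROOFS =====
-- non-accumulator form of B's loop, used only by the proofs
def solveGo : List Int → Int
  | [] => 0
  | [a] => a
  | a :: b :: rest => a + 3 * b + solveGo rest

theorem solveGoAcc_eq (l : List Int) (t : Int) : solveGoAcc t l = t + solveGo l := by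
  induction l using solveGo.induct generalizing t with
  | case1 => simp [solveGoAcc, solveGo]
  | case2 a => simp [solveGoAcc, solveGo]
  | case3 a b rest ih => simp [solveGoAcc, solveGo, ih]; ring

-- A's parity fold, started at an even index, computes solveGo
theorem foldl_enumerate_eq_go (l : List Int) (s acc : Int) (hs : s % 2 = 0) :
    (PySem.List.enumerate l s).foldl
      (fun one_three_sum p =>
        if p.1 % 2 = 0 then one_three_sum + p.2 * 1 else one_three_sum + p.2 * 3) acc
      = acc + solveGo l := by
  induction l using solveGo.induct generalizing s acc with
  | case1 => simp [PySem.List.enumerate, solveGo]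
  | case2 a =>
      simp [PySem.List.enumerate, solveGo, hs]
  | case3 a b rest ih =>
      have h1 : (s + 1) % 2 ≠ 0 := by omega
      have h2 : (s + 1 + 1) % 2 = 0 := by omega
      simp only [PySem.List.enumerate_cons, List.foldl_cons, hs, if_neg h1,
        ih (s + 1 + 1) _ h2, solveGo]
      simp
      ring

theorem go_fixed (l : List Int) :
    solveGo ([9,7,8,0,9,2,1,4,1,8] ++ l) = 91 + solveGo l := by
  simp [solveGo]; ring

-- ===== VERDICT (by name: the statement is the Claim_ definition above) =====
theorem solve_spec : Claim_equal_solve := by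
  intro l _
  unfold Spec_solve solve solve_alt
  simp only [foldl_enumerate_eq_go _ 0 0 rfl, go_fixed, solveGoAcc_eq]
  ring
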